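-- pv_equiv track=rewrite | github.com/pypi-data/pypi-mirror-404 | packages/anatomize/anatomize-0.2.0.tar.gz/anatomize-0.2.0/src/anatomize/pack/tree.py | render_token_tree
-- ===== SOURCE A (Python) =====
-- from typing import TypeAlias, Union, cast
--
-- TokenTree: TypeAlias = dict[str, Union[int, "TokenTree"]]
--
-- def render_token_tree(tokens_by_path: dict[str, int]) -> list[str]:
--     tree: TokenTree = {}
--     for path in sorted(tokens_by_path.keys()):
--         parts = [p for p in path.split("/") if p and p != "."]
--         node: TokenTree = tree
--         for part in parts[:-1]:
--             child = node.get(part)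
--             if isinstance(child, dict):
--                 node = child
--                 continue
--             new_child: TokenTree = {}
--             node[part] = new_child
--             node = new_child
--         leaf = parts[-1] if parts else path
--         node[leaf] = tokens_by_path[path]
--
--     lines: list[str] = []
--
--     def walk(node: TokenTree, prefix: str) -> None:
--         dirs = sorted([k for k, v in node.items() if isinstance(v, dict)])
--         files = sorted([k for k, v in node.items() if isinstance(v, int)])
--         for name in dirs:
--             lines.append(f"{prefix}{name}/")
--             child = node[name]
--             if isinstance(child, dict):
--                 walk(child, prefix + "  ")
--         for name in files:
--             lines.append(f"{prefix}{name} ({cast(int, node[name]):,})")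
--
--     walk(tree, "")
--     return lines
-- ===== SOURCE B (Python) =====
-- def render_token_tree(tokens_by_path):
--     entries = []
--     for path in sorted(tokens_by_path):
--         parts = [p for p in path.split("/") if p and p != "."]
--         entries.append((parts if parts else [path], tokens_by_path[path]))
--     lines = []
--
--     def emit(entries, prefix):
--         groups = {}
--         for parts, count in entries:
--             name, rest = parts[0], parts[1:]
--             if not rest:
--                 groups[name] = count
--             elif isinstance(groups.get(name), list):
--                 groups[name].append((rest, count))
--             else:
--                 groups[name] = [(rest, count)]
--         for name in sorted(n for n, v in groups.items() if isinstance(v, list)):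
--             lines.append(f"{prefix}{name}/")
--             emit(groups[name], prefix + "  ")
--         for name in sorted(n for n, v in groups.items() if isinstance(v, int)):
--             lines.append(f"{prefix}{name} ({groups[name]:,})")
--
--     emit(entries, "")
--     return lines
-- ===== Notes on version B (the rewrite author's own statement) =====
-- stated objective: alternative
-- what changed: B never builds A's nested tree dict: it normalizes the sorted paths once into (parts, count) entries and renders recursively by grouping entries on their first component at each level (a flat one-level dict per level, with files overwriting groups and later entries extending groups exactly as Python dict assignment does), emitting sorted directory names then sorted file names as it recurses.
import Mathlib
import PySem

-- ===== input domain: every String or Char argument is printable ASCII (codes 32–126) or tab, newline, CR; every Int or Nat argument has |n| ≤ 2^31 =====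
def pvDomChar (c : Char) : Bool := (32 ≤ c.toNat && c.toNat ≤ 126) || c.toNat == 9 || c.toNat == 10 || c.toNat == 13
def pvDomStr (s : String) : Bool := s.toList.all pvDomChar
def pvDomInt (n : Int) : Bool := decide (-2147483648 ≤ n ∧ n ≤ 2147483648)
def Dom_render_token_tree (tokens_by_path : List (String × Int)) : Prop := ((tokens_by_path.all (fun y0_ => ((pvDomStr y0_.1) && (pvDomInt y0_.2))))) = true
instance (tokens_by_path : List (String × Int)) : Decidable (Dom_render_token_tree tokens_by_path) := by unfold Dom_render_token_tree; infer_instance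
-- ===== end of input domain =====

-- B renders the tree directly from the sorted (parts, count) entries by grouping on the first
-- path component level by level, instead of first materialising A's nested dict; equal output,
-- a different decomposition (objective: alternative).

-- ===== PORT A =====
-- shared helper (used by both ports): Python's format spec "{n:,}" (thousands separators)
def pvGroup3 : List Char → List Char
  | a :: b :: c :: d :: rest => a :: b :: c :: ',' :: pvGroup3 (d :: rest)
  | l => l

def pvFormatComma (n : Int) : String :=
  let gs := (pvGroup3 (PySem.Int.toChars (n.natAbs : Int)).reverse).reverse
  String.ofList (if n < 0 then '-' :: gs else gs)

mutual
inductive PTree where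
  | file : Int → PTree
  | dir : TList → PTree
inductive TList where
  | nil : TList
  | cons : String → PTree → TList → TList
end

def TList.get? : TList → String → Option PTree
  | .nil, _ => none
  | .cons k v r, s => if k = s then some v else r.get? s

def TList.set : TList → String → PTree → TList
  | .nil, k, v => .cons k v .nil
  | .cons k' v' r, k, v => if k' = k then .cons k' v r else .cons k' v' (r.set k v)

def TList.items : TList → List (String × PTree)
  | .nil => []
  | .cons k v r => (k, v) :: r.items

mutual
def pvSizeP : PTree → Nat
  | .file _ => 1
  | .dir l => pvSizeT l + 1
def pvSizeT : TList → Nat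
  | .nil => 1
  | .cons _ v r => pvSizeP v + pvSizeT r + 1
end

theorem pvSizeT_get?_dir : ∀ (t : TList) (n : String) (sub : TList),
    t.get? n = some (PTree.dir sub) → pvSizeT sub + 1 < pvSizeT t
  | .nil, n, sub, h => by simp [TList.get?] at h
  | .cons k v r, n, sub, h => by
    simp only [TList.get?] at h
    split at h
    · cases h; simp [pvSizeT, pvSizeP]
    · have := pvSizeT_get?_dir r n sub h; simp [pvSizeT]; omega

-- A-side: normalize a path as A's comprehension does
def pvPartsA (path : String) : List String :=
  ((PySem.Str.split? path "/").getD []).filter (fun p => p != "" && p != ".")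

def pvInsertPath : TList → List String → String → Int → TList
  | t, [], leaf, c => t.set leaf (.file c)
  | t, p :: rest, leaf, c =>
    match t.get? p with
    | some (.dir sub) => t.set p (.dir (pvInsertPath sub rest leaf c))
    | _ => t.set p (.dir (pvInsertPath .nil rest leaf c))

mutual
def pvWalk (t : TList) (pre : String) : List String :=
  let dirs := PySem.List.sorted ((t.items.filter (fun p => match p.2 with | .dir _ => true | _ => false)).map (·.1)) (fun x => x) false
  let files := PySem.List.sorted ((t.items.filter (fun p => match p.2 with | .file _ => true | _ => false)).map (·.1)) (fun x => x) false
  pvWalkDirs t pre dirs ++ files.map (fun n =>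
    pre ++ n ++ " (" ++ pvFormatComma (match t.get? n with | some (.file c) => c | _ => 0) ++ ")")
termination_by (pvSizeT t + 1, 0)
decreasing_by exact Prod.Lex.left _ _ (by omega)
def pvWalkDirs (t : TList) (pre : String) : List String → List String
  | [] => []
  | n :: rest =>
    (pre ++ n ++ "/") ::
      ((match h : t.get? n with
        | some (.dir sub) => pvWalk sub (pre ++ "  ")
        | _ => []) ++ pvWalkDirs t pre rest)
termination_by names => (pvSizeT t, names.length)
decreasing_by
  all_goals first
    | exact Prod.Lex.left _ _ (pvSizeT_get?_dir t n sub h)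
    | exact Prod.Lex.right _ (by simp)
end
def render_token_tree (tokens_by_path : List (String × Int)) : List String :=
  let keys := PySem.List.sorted (PySem.List.dedup (tokens_by_path.map (·.1))) (fun x => x) false
  let tree := keys.foldl (fun tr path =>
    let parts := pvPartsA path
    pvInsertPath tr parts.dropLast ((parts.getLast?).getD path)
      ((PySem.Dict.mk tokens_by_path).getD path 0)) TList.nil
  pvWalk tree ""

-- ===== PORT B =====
-- B-side: normalize a path (same comprehension as in Source B)
def pvPartsB (path : String) : List String :=
  ((PySem.Str.split? path "/").getD []).filter (fun p => p != "" && p != ".")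

-- group value: Sum.inl count (a file) / Sum.inr tail-entries (a directory)
def pvGroupStep (d : PySem.Dict String (Sum Int (List (List String × Int))))
    (e : List String × Int) : PySem.Dict String (Sum Int (List (List String × Int))) :=
  match e.1 with
  | [] => d
  | name :: rest =>
    if rest.isEmpty then d.insert name (Sum.inl e.2)
    else
      match d.get? name with
      | some (Sum.inr ts) => d.insert name (Sum.inr (ts ++ [(rest, e.2)]))
      | _ => d.insert name (Sum.inr [(rest, e.2)])

def pvW (es : List (List String × Int)) : Nat := (es.map (fun e => e.1.length)).sum

def pvWv : Sum Int (List (List String × Int)) → Nat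
  | Sum.inl _ => 0
  | Sum.inr ts => pvW ts + 1

def pvWD (d : PySem.Dict String (Sum Int (List (List String × Int)))) : Nat :=
  (d.items.map (fun p => pvWv p.2)).sum

theorem pvWD_get? (d : PySem.Dict String (Sum Int (List (List String × Int))))
    (n : String) (v : Sum Int (List (List String × Int)))
    (h : d.get? n = some v) : pvWv v ≤ pvWD d := by
  have hm := PySem.Dict.mem_items_of_get?_eq_some (d := d) h
  unfold pvWD
  exact List.le_sum_of_mem (List.mem_map_of_mem hm)

theorem pvW_append (a b : List (List String × Int)) : pvW (a ++ b) = pvW a + pvW b := by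
  simp [pvW]

theorem pvSumUpd (k : String) (v w : Sum Int (List (List String × Int))) (m : Nat)
    (hb : pvWv v ≤ pvWv w + m) :
    ∀ (l : List (String × (Sum Int (List (List String × Int))))),
      (l.map Prod.fst).Nodup → (∀ p ∈ l, p.1 = k → p.2 = w) →
      (l.map (fun p => pvWv (if p.1 == k then (k, v) else p).2)).sum
        ≤ (l.map (fun p => pvWv p.2)).sum + m
  | [], _, _ => by simp
  | a :: l, hnd, hall => by
    simp only [List.map_cons, List.sum_cons]
    by_cases hk : a.1 = k
    · have ha : a.2 = w := hall a (by simp) hk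
      have htail : ∀ p ∈ l, p.1 ≠ k := by
        intro p hp hpk
        have : a.1 ∈ l.map Prod.fst := by
          rw [hk, ← hpk]; exact List.mem_map_of_mem hp
        exact (List.nodup_cons.mp (by simpa using hnd)).1 this
      have : (l.map (fun p => pvWv (if p.1 == k then (k, v) else p).2)) =
          (l.map (fun p => pvWv p.2)) := by
        apply List.map_congr_left
        intro p hp
        simp [htail p hp]
      rw [this]
      have hhead : pvWv (if (a.1 == k) = true then (k, v) else a).2 = pvWv v := by
        simp [hk]
      rw [hhead, ha]
      omega
    · have hne : (a.1 == k) = false := by simp [hk]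
      simp only [hne, Bool.false_eq_true, if_false]
      have := pvSumUpd k v w m hb l (List.nodup_cons.mp (by simpa using hnd)).2
        (fun p hp => hall p (by simp [hp]))
      omega

theorem pvWD_insert_le (d : PySem.Dict String (Sum Int (List (List String × Int))))
    (k : String) (v w : Sum Int (List (List String × Int))) (m : Nat)
    (hnd : d.keys.Nodup) (hw : d.get? k = some w) (hb : pvWv v ≤ pvWv w + m) :
    pvWD (d.insert k v) ≤ pvWD d + m := by
  have hc : d.contains k = true := by
    rw [PySem.Dict.contains_eq_isSome_get?, hw]; rfl
  have hall : ∀ p ∈ d.items, p.1 = k → p.2 = w := by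
    rintro ⟨k1, v1⟩ hp heq
    subst heq
    have h1 : d.get? k1 = some v1 := PySem.Dict.get?_of_mem_items d hp hnd
    rw [hw] at h1
    exact (Option.some.inj h1).symm
  have hmain := pvSumUpd k v w m hb d.items (by simpa [PySem.Dict.keys] using hnd) hall
  simpa [pvWD, PySem.Dict.items_insert_of_contains d v hc, List.map_map, Function.comp] using hmain

theorem pvWD_insert_new (d : PySem.Dict String (Sum Int (List (List String × Int))))
    (k : String) (v : Sum Int (List (List String × Int)))
    (hc : d.contains k = false) : pvWD (d.insert k v) = pvWD d + pvWv v := by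
  rw [pvWD, PySem.Dict.items_insert_of_not_contains d v hc]
  simp [pvWD]

theorem pvGroupStep_nodup (d : PySem.Dict String (Sum Int (List (List String × Int))))
    (e : List String × Int) (h : d.keys.Nodup) : (pvGroupStep d e).keys.Nodup := by
  unfold pvGroupStep
  rcases e with ⟨parts, c⟩
  match parts with
  | [] => exact h
  | name :: rest =>
    simp only
    split
    · exact PySem.Dict.nodup_keys_insert _ _ _ h
    · split <;> exact PySem.Dict.nodup_keys_insert _ _ _ h

theorem pvWD_groupStep (d : PySem.Dict String (Sum Int (List (List String × Int))))
    (e : List String × Int) (hnd : d.keys.Nodup) :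
    pvWD (pvGroupStep d e) ≤ pvWD d + e.1.length := by
  unfold pvGroupStep
  rcases e with ⟨parts, c⟩
  match parts with
  | [] => simp
  | name :: rest =>
    simp only
    by_cases hre : rest.isEmpty
    · simp only [hre, if_true]
      cases hg : d.get? name with
      | some w =>
        have := pvWD_insert_le d name (Sum.inl c) w 0 hnd hg (by simp [pvWv])
        omega
      | none =>
        have hc : d.contains name = false := by
          rw [PySem.Dict.contains_eq_isSome_get?, hg]; rfl
        have := pvWD_insert_new d name (Sum.inl c) hc
        simp [pvWv] at this; omega
    · simp only [hre, Bool.false_eq_true, if_false]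
      cases hg : d.get? name with
      | some w =>
        cases w with
        | inr ts =>
          have := pvWD_insert_le d name (Sum.inr (ts ++ [(rest, c)])) (Sum.inr ts)
            (rest.length + 1) hnd hg (by simp [pvWv, pvW_append, pvW]; omega)
          simp only [List.length_cons]; omega
        | inl c' =>
          simp only
          have := pvWD_insert_le d name (Sum.inr [(rest, c)]) (Sum.inl c')
            (rest.length + 1) hnd hg (by simp [pvWv, pvW])
          simp only [List.length_cons]; omega
      | none =>
        have hc : d.contains name = false := by
          rw [PySem.Dict.contains_eq_isSome_get?, hg]; rfl
        simp only
        have := pvWD_insert_new d name (Sum.inr [(rest, c)]) hc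
        simp [pvWv, pvW] at this
        simp only [List.length_cons]; omega

theorem pvWD_groups (es : List (List String × Int))
    (d : PySem.Dict String (Sum Int (List (List String × Int)))) (hnd : d.keys.Nodup) :
    pvWD (es.foldl pvGroupStep d) ≤ pvWD d + pvW es := by
  induction es generalizing d with
  | nil => simp [pvW]
  | cons e es ih =>
    have h1 := pvWD_groupStep d e hnd
    have h2 := ih (pvGroupStep d e) (pvGroupStep_nodup d e hnd)
    simp only [List.foldl_cons]
    have : pvW (e :: es) = e.1.length + pvW es := by simp [pvW]
    omega

theorem pvWD_empty : pvWD (PySem.Dict.empty : PySem.Dict String (Sum Int (List (List String × Int)))) = 0 := by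
  rfl

mutual
def pvEmit (es : List (List String × Int)) (pre : String) : List String :=
  let d := es.foldl pvGroupStep PySem.Dict.empty
  let dirs := PySem.List.sorted ((d.items.filter (fun p => p.2.isRight)).map (·.1)) (fun x => x) false
  let files := PySem.List.sorted ((d.items.filter (fun p => p.2.isLeft)).map (·.1)) (fun x => x) false
  pvEmitDirs d pre dirs ++ files.map (fun n =>
    pre ++ n ++ " (" ++ pvFormatComma (match d.get? n with | some (Sum.inl c) => c | _ => 0) ++ ")")
termination_by (pvW es + 1, 0)
decreasing_by
  refine Prod.Lex.left _ _ ?_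
  have := pvWD_groups es PySem.Dict.empty (by simp [PySem.Dict.keys_empty])
  rw [pvWD_empty] at this
  simp only [List.foldl_attach]
  omega
def pvEmitDirs (d : PySem.Dict String (Sum Int (List (List String × Int)))) (pre : String) :
    List String → List String
  | [] => []
  | n :: rest =>
    (pre ++ n ++ "/") ::
      ((match h : d.get? n with
        | some (Sum.inr ts) => pvEmit ts (pre ++ "  ")
        | _ => []) ++ pvEmitDirs d pre rest)
termination_by names => (pvWD d, names.length)
decreasing_by
  all_goals first
    | · have := pvWD_get? d n (Sum.inr ts) h
        simp [pvWv] at this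
        rcases Nat.lt_or_ge (pvW ts + 1) (pvWD d) with hlt | hge
        · exact Prod.Lex.left _ _ hlt
        · have : pvW ts + 1 = pvWD d := by omega
          rw [← this]
          exact Prod.Lex.right _ (by simp)
    | exact Prod.Lex.right _ (by simp)
end

def render_token_tree_alt (tokens_by_path : List (String × Int)) : List String :=
  let keys := PySem.List.sorted (PySem.List.dedup (tokens_by_path.map (·.1))) (fun x => x) false
  let entries := keys.foldl (fun acc path =>
    let parts := pvPartsB path
    acc ++ [(if parts.isEmpty then [path] else parts,
             (PySem.Dict.mk tokens_by_path).getD path 0)]) []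
  pvEmit entries ""

-- ===== PRECONDITION & SPEC =====
def Spec_render_token_tree (tokens_by_path : List (String × Int)) (out : List String) : Prop := out = render_token_tree_alt tokens_by_path
instance (tokens_by_path : List (String × Int)) (out : List String) : Decidable (Spec_render_token_tree tokens_by_path out) := by unfold Spec_render_token_tree; infer_instance

-- ===== CLAIM (what is proved, stated in full; the proofs are below) =====
def Claim_equal_render_token_tree : Prop := ∀ (tokens_by_path : List (String × Int)), Dom_render_token_tree tokens_by_path → Spec_render_token_tree tokens_by_path (render_token_tree tokens_by_path)

-- ===== LEMMAS AND PROOFS =====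
theorem pvGroups_nodup (es : List (List String × Int))
    (d : PySem.Dict String (Sum Int (List (List String × Int)))) (h : d.keys.Nodup) :
    (es.foldl pvGroupStep d).keys.Nodup := by
  induction es generalizing d with
  | nil => exact h
  | cons e es ih => exact ih _ (pvGroupStep_nodup d e h)
-- ===== proof-side definitions =====

def pvInsE (t : TList) (e : List String × Int) : TList :=
  pvInsertPath t e.1.dropLast ((e.1.getLast?).getD "") e.2

def pvBuild (es : List (List String × Int)) : TList := es.foldl pvInsE TList.nil

def pvRel : Option PTree → Option (Sum Int (List (List String × Int))) → Prop
  | none, none => True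
  | some (.file c), some (Sum.inl c') => c = c'
  | some (.dir sub), some (Sum.inr ts) => sub = pvBuild ts
  | _, _ => False

def pvKeysT : TList → List String
  | .nil => []
  | .cons k _ r => k :: pvKeysT r

theorem pvGet?_set_self : ∀ (t : TList) (k : String) (v : PTree), (t.set k v).get? k = some v
  | .nil, k, v => by simp [TList.set, TList.get?]
  | .cons k' v' r, k, v => by
    by_cases h : k' = k
    · simp [TList.set, TList.get?, h]
    · simp only [TList.set, if_neg h]
      simp [TList.get?, h]
      exact pvGet?_set_self r k v

theorem pvGet?_set_ne : ∀ (t : TList) (k : String) (v : PTree) (m : String), m ≠ k →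
    (t.set k v).get? m = t.get? m
  | .nil, k, v, m, h => by
    have hh : ¬ k = m := fun hh => h hh.symm
    simp [TList.set, TList.get?, hh]
  | .cons k' v' r, k, v, m, h => by
    by_cases h' : k' = k
    · subst h'
      have hh : ¬ k' = m := fun hh => h hh.symm
      simp [TList.set, TList.get?, hh]
    · simp only [TList.set, if_neg h']
      by_cases hm : k' = m
      · simp [TList.get?, hm]
      · simp [TList.get?, hm]
        exact pvGet?_set_ne r k v m h

theorem pvKeysT_set : ∀ (t : TList) (k : String) (v : PTree),
    pvKeysT (t.set k v) = if k ∈ pvKeysT t then pvKeysT t else pvKeysT t ++ [k]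
  | .nil, k, v => by simp [TList.set, pvKeysT]
  | .cons k' v' r, k, v => by
    by_cases h : k' = k
    · simp [TList.set, pvKeysT, h]
    · simp only [TList.set, if_neg h, pvKeysT]
      rw [pvKeysT_set r k v]
      have hh : ¬ k = k' := fun hh => h hh.symm
      by_cases hm : k ∈ pvKeysT r
      · simp [hm, hh]
      · simp [hm, hh]

theorem pvItemsT_eq : ∀ (t : TList), (pvKeysT t).Nodup →
    t.items = (pvKeysT t).map (fun k => (k, (t.get? k).getD (PTree.file 0)))
  | .nil, _ => by simp [TList.items, pvKeysT]
  | .cons k v r, hnd => by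
    simp only [TList.items, pvKeysT, List.map_cons]
    have hnd' : (pvKeysT r).Nodup := (List.nodup_cons.mp hnd).2
    have hk : k ∉ pvKeysT r := (List.nodup_cons.mp hnd).1
    refine List.cons_eq_cons.mpr ⟨?_, ?_⟩
    · simp [TList.get?]
    · rw [pvItemsT_eq r hnd']
      apply List.map_congr_left
      intro m hm
      have : k ≠ m := fun hh => hk (hh ▸ hm)
      simp [TList.get?, this]

theorem pvBuild_append (ts : List (List String × Int)) (e : List String × Int) :
    pvBuild (ts ++ [e]) = pvInsE (pvBuild ts) e := by
  simp [pvBuild, List.foldl_append]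

theorem pvInsE_eq (t : TList) (n : String) (rest : List String) (c : Int) :
    pvInsE t (n :: rest, c) =
      if rest.isEmpty then t.set n (.file c)
      else match t.get? n with
        | some (.dir sub) => t.set n (.dir (pvInsE sub (rest, c)))
        | _ => t.set n (.dir (pvInsE .nil (rest, c))) := by
  cases rest with
  | nil => simp [pvInsE, pvInsertPath]
  | cons r rs =>
    simp only [pvInsE, List.dropLast_cons₂, List.getLast?_cons_cons, List.isEmpty_cons,
      Bool.false_eq_true, if_false]
    rw [pvInsertPath]
theorem pvRelStep (t : TList) (d : PySem.Dict String (Sum Int (List (List String × Int))))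
    (hrel : ∀ m, pvRel (t.get? m) (d.get? m)) (e : List String × Int) (he : e.1 ≠ []) :
    ∀ m, pvRel ((pvInsE t e).get? m) ((pvGroupStep d e).get? m) := by
  intro m
  rcases e with ⟨parts, c⟩
  cases parts with
  | nil => exact absurd rfl he
  | cons n rest =>
    rw [pvInsE_eq]
    unfold pvGroupStep
    simp only
    by_cases hm : m = n
    · subst hm
      by_cases hre : rest.isEmpty
      · simp only [hre, if_true, pvGet?_set_self, PySem.Dict.get?_insert_self]
        exact rfl
      · simp only [hre, Bool.false_eq_true, if_false]
        have h := hrel m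
        cases ht : t.get? m with
        | some p =>
          cases p with
          | dir sub =>
            cases hd : d.get? m with
            | some g =>
              cases g with
              | inr ts =>
                rw [ht, hd] at h
                simp only [pvRel] at h
                simp only [pvGet?_set_self, PySem.Dict.get?_insert_self, pvRel]
                rw [h, ← pvBuild_append]
              | inl c' => rw [ht, hd] at h; simp [pvRel] at h
            | none => rw [ht, hd] at h; simp [pvRel] at h
          | file c' =>
            cases hd : d.get? m with
            | some g =>
              cases g with
              | inl c'' =>
                simp only [pvGet?_set_self, PySem.Dict.get?_insert_self, pvRel]
                rfl
              | inr ts => rw [ht, hd] at h; simp [pvRel] at h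
            | none => rw [ht, hd] at h; simp [pvRel] at h
        | none =>
          cases hd : d.get? m with
          | some g => rw [ht, hd] at h; cases g <;> simp [pvRel] at h
          | none =>
            simp only [pvGet?_set_self, PySem.Dict.get?_insert_self, pvRel]
            rfl
    · -- m ≠ n : everything unchanged
      by_cases hre : rest.isEmpty
      · simp only [hre, if_true]
        rw [pvGet?_set_ne t n _ m hm, PySem.Dict.get?_insert_of_ne _ _ hm]
        exact hrel m
      · simp only [hre, Bool.false_eq_true, if_false]
        have hL : ∀ v : PTree, (TList.set t n v).get? m = t.get? m :=
          fun v => pvGet?_set_ne t n v m hm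
        have hR : ∀ g : Sum Int (List (List String × Int)),
            ((d.insert n g).get? m) = d.get? m :=
          fun g => PySem.Dict.get?_insert_of_ne _ _ hm
        cases ht : t.get? n with
        | none =>
          cases hd : d.get? n with
          | none => simp only [hL, hR]; exact hrel m
          | some g => cases g <;> (simp only [hL, hR]; exact hrel m)
        | some p =>
          cases p <;>
            (cases hd : d.get? n with
             | none => simp only [hL, hR]; exact hrel m
             | some g => cases g <;> (simp only [hL, hR]; exact hrel m))
theorem pvKeysStep (t : TList) (d : PySem.Dict String (Sum Int (List (List String × Int))))
    (hk : pvKeysT t = d.keys) (e : List String × Int) (he : e.1 ≠ []) :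
    pvKeysT (pvInsE t e) = (pvGroupStep d e).keys := by
  rcases e with ⟨parts, c⟩
  cases parts with
  | nil => exact absurd rfl he
  | cons n rest =>
    rw [pvInsE_eq]
    unfold pvGroupStep
    simp only
    have hins : ∀ g : Sum Int (List (List String × Int)),
        (d.insert n g).keys = if n ∈ d.keys then d.keys else d.keys ++ [n] := by
      intro g
      by_cases hc : d.contains n = true
      · rw [PySem.Dict.keys_insert_of_contains d g hc,
          if_pos ((PySem.Dict.contains_iff_mem_keys d n).mp hc)]
      · have hc' : d.contains n = false := by revert hc; cases d.contains n <;> simp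
        rw [PySem.Dict.keys_insert_of_not_contains d g hc',
          if_neg (fun hmem => by
            rw [(PySem.Dict.contains_iff_mem_keys d n).mpr hmem] at hc'; cases hc')]
    have hset : ∀ v : PTree, pvKeysT (t.set n v) = if n ∈ d.keys then d.keys else d.keys ++ [n] := by
      intro v; rw [pvKeysT_set, hk]
    by_cases hre : rest.isEmpty
    · simp only [hre, if_true, hset, hins]
    · simp only [hre, Bool.false_eq_true, if_false]
      cases ht : t.get? n with
      | none =>
        cases hd : d.get? n with
        | none => simp only [hset, hins]
        | some g => cases g <;> simp only [hset, hins]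
      | some p =>
        cases p <;>
          (cases hd : d.get? n with
           | none => simp only [hset, hins]
           | some g => cases g <;> simp only [hset, hins])

def pvGood (d : PySem.Dict String (Sum Int (List (List String × Int)))) : Prop :=
  ∀ n ts, d.get? n = some (Sum.inr ts) → ∀ x ∈ ts, x.1 ≠ []

theorem pvGoodStep (d : PySem.Dict String (Sum Int (List (List String × Int))))
    (hg : pvGood d) (e : List String × Int) : pvGood (pvGroupStep d e) := by
  rcases e with ⟨parts, c⟩
  cases parts with
  | nil => exact hg
  | cons n rest =>
    unfold pvGroupStep
    simp only
    intro m ts hm x hx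
    by_cases hmn : m = n
    · subst hmn
      by_cases hre : rest.isEmpty
      · simp only [hre, if_true, PySem.Dict.get?_insert_self] at hm
        cases hm
      · have hrne : rest ≠ [] := by
          cases rest with
          | nil => simp at hre
          | cons a b => simp
        simp only [hre, Bool.false_eq_true, if_false] at hm
        cases hd : d.get? m with
        | none =>
          rw [hd] at hm
          simp only [PySem.Dict.get?_insert_self] at hm
          cases hm
          simp at hx
          rw [hx]; exact hrne
        | some g =>
          rw [hd] at hm
          cases g with
          | inl c' =>
            simp only [PySem.Dict.get?_insert_self] at hm
            cases hm
            simp at hx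
            rw [hx]; exact hrne
          | inr ts0 =>
            simp only [PySem.Dict.get?_insert_self] at hm
            cases hm
            rcases List.mem_append.mp hx with h1 | h1
            · exact hg m ts0 hd x h1
            · simp at h1; rw [h1]; exact hrne
    · have hun : ∀ g : Sum Int (List (List String × Int)),
          ((d.insert n g).get? m) = d.get? m :=
        fun g => PySem.Dict.get?_insert_of_ne _ _ hmn
      by_cases hre : rest.isEmpty
      · simp only [hre, if_true, hun] at hm
        exact hg m ts hm x hx
      · simp only [hre, Bool.false_eq_true, if_false] at hm
        cases hd : d.get? n with
        | none =>
          rw [hd] at hm; simp only [hun] at hm; exact hg m ts hm x hx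
        | some g =>
          rw [hd] at hm
          cases g with
          | inl c' => simp only [hun] at hm; exact hg m ts hm x hx
          | inr ts0 => simp only [hun] at hm; exact hg m ts hm x hx

theorem pvRelFold (es : List (List String × Int)) :
    ∀ (t : TList) (d : PySem.Dict String (Sum Int (List (List String × Int)))),
      (∀ m, pvRel (t.get? m) (d.get? m)) → (∀ e ∈ es, e.1 ≠ []) →
      ∀ m, pvRel ((es.foldl pvInsE t).get? m) ((es.foldl pvGroupStep d).get? m) := by
  induction es with
  | nil => intro t d h _ m; exact h m
  | cons e es ih =>
    intro t d h he m
    exact ih _ _ (pvRelStep t d h e (he e (by simp)))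
      (fun x hx => he x (by simp [hx])) m

theorem pvKeysFold (es : List (List String × Int)) :
    ∀ (t : TList) (d : PySem.Dict String (Sum Int (List (List String × Int)))),
      pvKeysT t = d.keys → (∀ e ∈ es, e.1 ≠ []) →
      pvKeysT (es.foldl pvInsE t) = (es.foldl pvGroupStep d).keys := by
  induction es with
  | nil => intro t d h _; exact h
  | cons e es ih =>
    intro t d h he
    exact ih _ _ (pvKeysStep t d h e (he e (by simp)))
      (fun x hx => he x (by simp [hx]))

theorem pvGoodFold (es : List (List String × Int)) :
    ∀ (d : PySem.Dict String (Sum Int (List (List String × Int)))),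
      pvGood d → pvGood (es.foldl pvGroupStep d) := by
  induction es with
  | nil => intro d h; exact h
  | cons e es ih => intro d h; exact ih _ (pvGoodStep d h e)
def pvIsDirO : Option PTree → Bool
  | some (.dir _) => true
  | _ => false

def pvIsFileO : Option PTree → Bool
  | some (.file _) => true
  | _ => false

def pvIsRightO : Option (Sum Int (List (List String × Int))) → Bool
  | some (Sum.inr _) => true
  | _ => false

def pvIsLeftO : Option (Sum Int (List (List String × Int))) → Bool
  | some (Sum.inl _) => true
  | _ => false

theorem pvGet?_none_not_mem : ∀ (t : TList) (k : String), t.get? k = none → k ∉ pvKeysT t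
  | .nil, k, _ => by simp [pvKeysT]
  | .cons k' v r, k, h => by
    simp only [TList.get?] at h
    split at h
    · cases h
    · rename_i hne
      simp only [pvKeysT, List.mem_cons, not_or]
      exact ⟨fun hh => hne hh.symm, pvGet?_none_not_mem r k h⟩

theorem pvDirsT (t : TList) (hnd : (pvKeysT t).Nodup) :
    ((t.items.filter (fun p => match p.2 with | .dir _ => true | _ => false)).map (·.1))
      = (pvKeysT t).filter (fun k => pvIsDirO (t.get? k)) := by
  rw [pvItemsT_eq t hnd, List.filter_map, List.map_map]
  have h1 : ((fun (p : String × PTree) => p.1) ∘ (fun k => (k, (t.get? k).getD (PTree.file 0)))) = id := by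
    funext k; rfl
  rw [h1, List.map_id]
  apply List.filter_congr
  intro k _
  simp only [Function.comp]
  cases hg : t.get? k with
  | none => simp [pvIsDirO]
  | some p => cases p <;> simp [pvIsDirO]

theorem pvFilesT (t : TList) (hnd : (pvKeysT t).Nodup) :
    ((t.items.filter (fun p => match p.2 with | .file _ => true | _ => false)).map (·.1))
      = (pvKeysT t).filter (fun k => pvIsFileO (t.get? k)) := by
  rw [pvItemsT_eq t hnd, List.filter_map, List.map_map]
  have h1 : ((fun (p : String × PTree) => p.1) ∘ (fun k => (k, (t.get? k).getD (PTree.file 0)))) = id := by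
    funext k; rfl
  rw [h1, List.map_id]
  apply List.filter_congr
  intro k hk
  simp only [Function.comp]
  cases hg : t.get? k with
  | none => exact absurd hk (pvGet?_none_not_mem t k hg)
  | some p => cases p <;> simp [pvIsFileO]

theorem pvDirsD (d : PySem.Dict String (Sum Int (List (List String × Int)))) (hnd : d.keys.Nodup) :
    ((d.items.filter (fun p => p.2.isRight)).map (·.1))
      = d.keys.filter (fun k => pvIsRightO (d.get? k)) := by
  rw [PySem.Dict.items_eq_map_keys d hnd (Sum.inl 0), List.filter_map, List.map_map]
  have h1 : ((fun (p : String × (Sum Int (List (List String × Int)))) => p.1)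
      ∘ (fun k => (k, d.getD k (Sum.inl 0)))) = id := by
    funext k; rfl
  rw [h1, List.map_id]
  apply List.filter_congr
  intro k _
  simp only [Function.comp, PySem.Dict.getD_eq_get?_getD]
  cases hg : d.get? k with
  | none => simp [pvIsRightO]
  | some g => cases g <;> simp [pvIsRightO]

theorem pvFilesD (d : PySem.Dict String (Sum Int (List (List String × Int)))) (hnd : d.keys.Nodup) :
    ((d.items.filter (fun p => p.2.isLeft)).map (·.1))
      = d.keys.filter (fun k => pvIsLeftO (d.get? k)) := by
  rw [PySem.Dict.items_eq_map_keys d hnd (Sum.inl 0), List.filter_map, List.map_map]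
  have h1 : ((fun (p : String × (Sum Int (List (List String × Int)))) => p.1)
      ∘ (fun k => (k, d.getD k (Sum.inl 0)))) = id := by
    funext k; rfl
  rw [h1, List.map_id]
  apply List.filter_congr
  intro k hk
  simp only [Function.comp, PySem.Dict.getD_eq_get?_getD]
  cases hg : d.get? k with
  | none => exact absurd hk ((PySem.Dict.get?_eq_none_iff_not_mem_keys d k).mp hg)
  | some g => cases g <;> simp [pvIsLeftO]
theorem pvDirsEq (t : TList) (d : PySem.Dict String (Sum Int (List (List String × Int))))
    (pre : String)
    (hrel : ∀ n, pvRel (t.get? n) (d.get? n))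
    (hrec : ∀ n ts, d.get? n = some (Sum.inr ts) →
      pvWalk (pvBuild ts) (pre ++ "  ") = pvEmit ts (pre ++ "  ")) :
    ∀ names, pvWalkDirs t pre names = pvEmitDirs d pre names := by
  intro names
  induction names with
  | nil => rw [pvWalkDirs, pvEmitDirs]
  | cons n rest ih =>
    rw [pvWalkDirs, pvEmitDirs]
    have hm : (match h : t.get? n with
        | some (PTree.dir sub) => pvWalk sub (pre ++ "  ")
        | _ => ([] : List String)) =
      (match h : d.get? n with
        | some (Sum.inr ts) => pvEmit ts (pre ++ "  ")
        | _ => ([] : List String)) := by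
      have h := hrel n
      cases ht : t.get? n with
      | none =>
        cases hd : d.get? n with
        | none => rfl
        | some g =>
          rw [ht, hd] at h
          cases g <;> simp [pvRel] at h
      | some p =>
        cases hd : d.get? n with
        | none => rw [ht, hd] at h; cases p <;> simp [pvRel] at h
        | some g =>
          rw [ht, hd] at h
          cases p with
          | file c => cases g with
            | inl c' => rfl
            | inr ts => simp [pvRel] at h
          | dir sub => cases g with
            | inl c' => simp [pvRel] at h
            | inr ts =>
              simp only [pvRel] at h
              simp only
              rw [h]
              exact hrec n ts hd
    rw [hm, ih]
theorem pvMain (k : Nat) : ∀ (es : List (List String × Int)) (pre : String),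
    pvW es ≤ k → (∀ e ∈ es, e.1 ≠ []) →
    pvWalk (pvBuild es) pre = pvEmit es pre := by
  induction k using Nat.strong_induction_on with
  | _ k ih =>
    intro es pre hW he
    have hrel : ∀ m, pvRel ((pvBuild es).get? m) ((es.foldl pvGroupStep PySem.Dict.empty).get? m) := by
      apply pvRelFold es TList.nil PySem.Dict.empty _ he
      intro m
      simp only [TList.get?, PySem.Dict.get?_empty]
      exact trivial
    have hkeys : pvKeysT (pvBuild es) = (es.foldl pvGroupStep PySem.Dict.empty).keys := by
      apply pvKeysFold es TList.nil PySem.Dict.empty _ he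
      simp [pvKeysT, PySem.Dict.keys_empty]
    have hndD : (es.foldl pvGroupStep PySem.Dict.empty).keys.Nodup :=
      pvGroups_nodup es PySem.Dict.empty (by simp [PySem.Dict.keys_empty])
    have hndT : (pvKeysT (pvBuild es)).Nodup := by rw [hkeys]; exact hndD
    have hgood : pvGood (es.foldl pvGroupStep PySem.Dict.empty) := by
      apply pvGoodFold
      intro n ts h
      rw [PySem.Dict.get?_empty] at h
      cases h
    have hrec : ∀ n ts, (es.foldl pvGroupStep PySem.Dict.empty).get? n = some (Sum.inr ts) →
        pvWalk (pvBuild ts) (pre ++ "  ") = pvEmit ts (pre ++ "  ") := by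
      intro n ts h
      have h1 : pvW ts + 1 ≤ pvWD (es.foldl pvGroupStep PySem.Dict.empty) := by
        have := pvWD_get? _ n (Sum.inr ts) h
        simpa [pvWv] using this
      have h2 : pvWD (es.foldl pvGroupStep PySem.Dict.empty) ≤ pvW es := by
        have := pvWD_groups es PySem.Dict.empty (by simp [PySem.Dict.keys_empty])
        rw [pvWD_empty] at this
        omega
      exact ih (pvW ts) (by omega) ts (pre ++ "  ") (le_refl _) (hgood n ts h)
    rw [pvWalk, pvEmit]
    have hdirs :
        PySem.List.sorted (((pvBuild es).items.filter
            (fun p => match p.2 with | .dir _ => true | _ => false)).map (·.1)) (fun x => x) false =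
        PySem.List.sorted (((es.foldl pvGroupStep PySem.Dict.empty).items.filter
            (fun p => p.2.isRight)).map (·.1)) (fun x => x) false := by
      rw [pvDirsT _ hndT, pvDirsD _ hndD, hkeys]
      congr 1
      apply List.filter_congr
      intro n _
      have h := hrel n
      cases ht : (pvBuild es).get? n <;> cases hd : (es.foldl pvGroupStep PySem.Dict.empty).get? n <;>
        rw [ht, hd] at h
      · rfl
      · rename_i g; cases g <;> simp [pvRel] at h
      · rename_i p; cases p <;> simp [pvRel] at h
      · rename_i p g
        cases p <;> cases g <;> simp [pvRel] at h <;> simp [pvIsDirO, pvIsRightO]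
    have hfiles :
        PySem.List.sorted (((pvBuild es).items.filter
            (fun p => match p.2 with | .file _ => true | _ => false)).map (·.1)) (fun x => x) false =
        PySem.List.sorted (((es.foldl pvGroupStep PySem.Dict.empty).items.filter
            (fun p => p.2.isLeft)).map (·.1)) (fun x => x) false := by
      rw [pvFilesT _ hndT, pvFilesD _ hndD, hkeys]
      congr 1
      apply List.filter_congr
      intro n _
      have h := hrel n
      cases ht : (pvBuild es).get? n <;> cases hd : (es.foldl pvGroupStep PySem.Dict.empty).get? n <;>
        rw [ht, hd] at h
      · rfl
      · rename_i g; cases g <;> simp [pvRel] at h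
      · rename_i p; cases p <;> simp [pvRel] at h
      · rename_i p g
        cases p <;> cases g <;> simp [pvRel] at h <;> simp [pvIsFileO, pvIsLeftO]
    have hfun : ∀ n : String,
        (pre ++ n ++ " (" ++ pvFormatComma (match (pvBuild es).get? n with
          | some (.file c) => c | _ => 0) ++ ")") =
        (pre ++ n ++ " (" ++ pvFormatComma (match (es.foldl pvGroupStep PySem.Dict.empty).get? n with
          | some (Sum.inl c) => c | _ => 0) ++ ")") := by
      intro n
      have h := hrel n
      have hint : (match (pvBuild es).get? n with
          | some (.file c) => c | _ => (0 : Int)) =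
          (match (es.foldl pvGroupStep PySem.Dict.empty).get? n with
          | some (Sum.inl c) => c | _ => (0 : Int)) := by
        cases ht : (pvBuild es).get? n with
        | none =>
          cases hd : (es.foldl pvGroupStep PySem.Dict.empty).get? n with
          | none => rfl
          | some g => rw [ht, hd] at h; cases g <;> simp [pvRel] at h
        | some p =>
          cases hd : (es.foldl pvGroupStep PySem.Dict.empty).get? n with
          | none => rw [ht, hd] at h; cases p <;> simp [pvRel] at h
          | some g =>
            rw [ht, hd] at h
            cases p with
            | file c =>
              cases g with
              | inl c' => simp only [pvRel] at h; simp [h]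
              | inr ts => simp [pvRel] at h
            | dir sub =>
              cases g with
              | inl c' => simp [pvRel] at h
              | inr ts => rfl
      rw [hint]
    rw [hdirs, hfiles, pvDirsEq _ _ _ hrel hrec]
    congr 1
    exact List.map_congr_left (fun n _ => hfun n)
def pvEntries (tbp : List (String × Int)) : List (List String × Int) :=
  (PySem.List.sorted (PySem.List.dedup (tbp.map (·.1))) (fun x => x) false).map
    (fun path => (if (pvPartsB path).isEmpty then [path] else pvPartsB path,
                  (PySem.Dict.mk tbp).getD path 0))

theorem pvEntries_ne (tbp : List (String × Int)) : ∀ e ∈ pvEntries tbp, e.1 ≠ [] := by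
  intro e he
  rcases List.mem_map.mp he with ⟨path, _, rfl⟩
  by_cases h : (pvPartsB path).isEmpty
  · simp [h]
  · simp only [h, Bool.false_eq_true, if_false]
    cases hps : pvPartsB path with
    | nil => rw [hps] at h; simp at h
    | cons a b => simp

theorem pvAfront (tbp : List (String × Int)) :
    render_token_tree tbp = pvWalk (pvBuild (pvEntries tbp)) "" := by
  unfold render_token_tree pvEntries pvBuild
  rw [List.foldl_map]
  have hP : pvPartsA = pvPartsB := rfl
  have hfun : ∀ (tr : TList) (path : String),
      pvInsertPath tr (pvPartsA path).dropLast (((pvPartsA path).getLast?).getD path)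
          ((PySem.Dict.mk tbp).getD path 0) =
      pvInsE tr (if (pvPartsB path).isEmpty then [path] else pvPartsB path,
          (PySem.Dict.mk tbp).getD path 0) := by
    intro tr path
    rw [hP]
    cases hps : pvPartsB path with
    | nil => simp [pvInsE, hps]
    | cons a b =>
      simp only [hps, List.isEmpty_cons, Bool.false_eq_true, if_false, pvInsE]
      have : ∃ x, (a :: b).getLast? = some x := by
        cases hx : (a :: b).getLast? with
        | none => simp at hx
        | some x => exact ⟨x, rfl⟩
      rcases this with ⟨x, hx⟩
      rw [hx]
      rfl
  simp only [hfun]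

theorem pvBfront (tbp : List (String × Int)) :
    render_token_tree_alt tbp = pvEmit (pvEntries tbp) "" := by
  unfold render_token_tree_alt pvEntries
  simp only [PySem.List.foldl_append_singleton_eq_map, List.nil_append]

-- ===== VERDICT (by name: the statement is the Claim_ definition above) =====
theorem render_token_tree_spec : Claim_equal_render_token_tree := by
  intro tokens_by_path _
  unfold Spec_render_token_tree
  rw [pvAfront, pvBfront]
  exact pvMain (pvW (pvEntries tokens_by_path)) (pvEntries tokens_by_path) ""
    (le_refl _) (pvEntries_ne tokens_by_path)
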